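-- pv_equiv track=rewrite | github.com/e-bushi/CS-2-Tweet-Generator | source/second_order_marcov.py | tuple_array_dict
-- ===== SOURCE A (Python) =====
-- def tuple_array_dict(word_list):
--     list_of_tuples = []
--     word_dict = {}
--     for i in range(0, len(word_list) - 1):
--         list_of_tuples.append(tuple([word_list[i], word_list[i+1]]))
--
--     for i in range(0, len(list_of_tuples) - 1):
--         if list_of_tuples[i] in word_dict:
--             word_dict[list_of_tuples[i]].append(list_of_tuples[i+1][1])
--         else:
--             word_dict[list_of_tuples[i]] = [list_of_tuples[i+1][1]]
--
--     return word_dict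
-- ===== SOURCE B (Python) =====
-- def tuple_array_dict(word_list):
--     word_dict = {}
--     for a, b, c in zip(word_list, word_list[1:], word_list[2:]):
--         word_dict.setdefault((a, b), []).append(c)
--     return word_dict
-- ===== Notes on version B (the rewrite author's own statement) =====
-- stated objective: simpler
-- what changed: A builds an intermediate list of adjacent pairs and then scans it by index with an explicit membership test; B makes one pass over zip(words, words[1:], words[2:]) and appends via setdefault, eliminating the intermediate list and the second loop.
import Mathlib
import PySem

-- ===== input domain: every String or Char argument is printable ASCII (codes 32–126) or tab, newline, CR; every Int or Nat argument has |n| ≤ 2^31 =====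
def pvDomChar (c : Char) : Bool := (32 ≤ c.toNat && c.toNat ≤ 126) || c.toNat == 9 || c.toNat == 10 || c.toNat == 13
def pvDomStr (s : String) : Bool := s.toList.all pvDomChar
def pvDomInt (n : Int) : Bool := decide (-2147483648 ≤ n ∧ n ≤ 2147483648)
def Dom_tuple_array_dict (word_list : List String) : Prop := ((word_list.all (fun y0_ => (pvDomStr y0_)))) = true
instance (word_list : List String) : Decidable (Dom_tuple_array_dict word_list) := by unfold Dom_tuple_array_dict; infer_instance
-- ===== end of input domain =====

-- B replaces A's two sequential index loops (build a pair list, then scan it by index) with a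
-- single pass over zipped triples appending via setdefault; objective: simpler, no intermediate list.

-- ===== PORT A =====
-- Both loop indices are always in range (0 ≤ i < len-1, so i+1 < len), so pyGetD is exact here.
def tuple_array_dict (word_list : List String) : List (String × String × List String) :=
  let list_of_tuples : List (String × String) :=
    (PySem.List.pyRange 0 ((word_list.length : Int) - 1) 1).foldl
      (fun acc i => acc ++ [(PySem.List.pyGetD word_list i "", PySem.List.pyGetD word_list (i + 1) "")]) []
  let word_dict : PySem.Dict (String × String) (List String) :=
    (PySem.List.pyRange 0 ((list_of_tuples.length : Int) - 1) 1).foldl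
      (fun d i =>
        if d.contains (PySem.List.pyGetD list_of_tuples i ("", ""))
        then d.modify (PySem.List.pyGetD list_of_tuples i ("", "")) []
               (· ++ [(PySem.List.pyGetD list_of_tuples (i + 1) ("", "")).2])
        else d.insert (PySem.List.pyGetD list_of_tuples i ("", ""))
               [(PySem.List.pyGetD list_of_tuples (i + 1) ("", "")).2])
      PySem.Dict.empty
  word_dict.items.map (fun p => (p.1.1, p.1.2, p.2))

-- ===== PORT B =====
-- zip(ws, ws[1:], ws[2:]) is the zip of the drops; 'setdefault((a,b), []).append(c)' sets
-- d[(a,b)] = d.get((a,b), []) + [c] keeping the key's position, i.e. exactly Dict.modify.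
def tuple_array_dict_alt (word_list : List String) : List (String × String × List String) :=
  let word_dict : PySem.Dict (String × String) (List String) :=
    (word_list.zip ((word_list.drop 1).zip (word_list.drop 2))).foldl
      (fun d t => d.modify (t.1, t.2.1) [] (· ++ [t.2.2])) PySem.Dict.empty
  word_dict.items.map (fun p => (p.1.1, p.1.2, p.2))

-- ===== PRECONDITION & SPEC =====
def Spec_tuple_array_dict (word_list : List String) (out : List (String × String × List String)) : Prop := out = tuple_array_dict_alt word_list
instance (word_list : List String) (out : List (String × String × List String)) : Decidable (Spec_tuple_array_dict word_list out) := by unfold Spec_tuple_array_dict; infer_instance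

-- ===== CLAIM (what is proved, stated in full; the proofs are below) =====
def Claim_equal_tuple_array_dict : Prop := ∀ (word_list : List String), Dom_tuple_array_dict word_list → Spec_tuple_array_dict word_list (tuple_array_dict word_list)

-- ===== LEMMAS AND PROOFS =====

-- A's first loop: mapping i ↦ (xs[i], xs[i+1]) over range(len-1) is zipping xs with its tail.
theorem pv_adjMap {α : Type} [Inhabited α] (xs : List α) (d0 : α) :
    (PySem.List.pyRange 0 ((xs.length : Int) - 1) 1).map
      (fun i => (PySem.List.pyGetD xs i d0, PySem.List.pyGetD xs (i + 1) d0))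
    = xs.zip (xs.drop 1) := by
  apply List.ext_getElem
  · simp [PySem.List.length_pyRange_one]
  · intro k h1 h2
    simp only [List.getElem_map, PySem.List.getElem_pyRange_one, zero_add]
    simp [PySem.List.length_pyRange_one] at h1
    have hc : ((k : Int) + 1) = ((k + 1 : Nat) : Int) := by push_cast; ring
    rw [hc]
    simp only [PySem.List.pyGetD_natCast]
    rw [List.getD_eq_getElem _ _ (by omega), List.getD_eq_getElem _ _ (by omega)]
    simp [List.getElem_zip]

-- The two triple streams coincide after projecting each to (first, second, follower).
theorem pv_triples (xs : List String) :
    (((xs.zip (xs.drop 1)).zip ((xs.zip (xs.drop 1)).drop 1)).map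
        (fun q => (q.1.1, q.1.2, q.2.2)))
    = (xs.zip ((xs.drop 1).zip (xs.drop 2))).map (fun t => (t.1, t.2.1, t.2.2)) := by
  apply List.ext_getElem
  · simp; omega
  · intro k h1 h2
    simp only [List.length_map, List.length_zip, List.length_drop, min_def] at h1 h2
    simp only [List.getElem_map, List.getElem_zip, List.getElem_drop]
    refine Prod.ext rfl (Prod.ext ?_ ?_) <;> (try rfl) <;> (dsimp; congr 1; omega)

-- A's membership branch is exactly Dict.modify with default [].
theorem pv_modify_ite (d : PySem.Dict (String × String) (List String)) (k : String × String) (v : String) :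
    (if d.contains k then d.modify k [] (· ++ [v]) else d.insert k [v])
    = d.modify k [] (· ++ [v]) := by
  by_cases h : d.contains k
  · simp [h]
  · have h' : d.contains k = false := by simpa using h
    simp [PySem.Dict.modify, PySem.Dict.getD_of_not_contains (h := h'), h']

-- ===== VERDICT (by name: the statement is the Claim_ definition above) =====
theorem tuple_array_dict_spec : Claim_equal_tuple_array_dict := by
  intro ws _
  unfold Spec_tuple_array_dict tuple_array_dict tuple_array_dict_alt
  simp only [PySem.List.foldl_append_singleton_eq_map, List.nil_append, pv_adjMap]
  congr 2
  calc
    (PySem.List.pyRange 0 (((ws.zip (ws.drop 1)).length : Int) - 1) 1).foldl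
      (fun d i =>
        if d.contains (PySem.List.pyGetD (ws.zip (ws.drop 1)) i ("", ""))
        then d.modify (PySem.List.pyGetD (ws.zip (ws.drop 1)) i ("", "")) []
               (· ++ [(PySem.List.pyGetD (ws.zip (ws.drop 1)) (i + 1) ("", "")).2])
        else d.insert (PySem.List.pyGetD (ws.zip (ws.drop 1)) i ("", ""))
               [(PySem.List.pyGetD (ws.zip (ws.drop 1)) (i + 1) ("", "")).2])
      PySem.Dict.empty
      = ((PySem.List.pyRange 0 (((ws.zip (ws.drop 1)).length : Int) - 1) 1).map
          (fun i => (PySem.List.pyGetD (ws.zip (ws.drop 1)) i ("", ""),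
                     PySem.List.pyGetD (ws.zip (ws.drop 1)) (i + 1) ("", "")))).foldl
          (fun d q => if d.contains q.1 then d.modify q.1 [] (· ++ [q.2.2]) else d.insert q.1 [q.2.2])
          PySem.Dict.empty := by rw [List.foldl_map]
    _ = ((ws.zip (ws.drop 1)).zip ((ws.zip (ws.drop 1)).drop 1)).foldl
          (fun d q => d.modify q.1 [] (· ++ [q.2.2])) PySem.Dict.empty := by
          rw [pv_adjMap]; simp only [pv_modify_ite]
    _ = (((ws.zip (ws.drop 1)).zip ((ws.zip (ws.drop 1)).drop 1)).map
          (fun q => (q.1.1, q.1.2, q.2.2))).foldl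
          (fun d t => d.modify (t.1, t.2.1) [] (· ++ [t.2.2])) PySem.Dict.empty := by
          rw [List.foldl_map]
    _ = (ws.zip ((ws.drop 1).zip (ws.drop 2))).foldl
          (fun d t => d.modify (t.1, t.2.1) [] (· ++ [t.2.2])) PySem.Dict.empty := by
          rw [pv_triples, List.foldl_map]
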